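-- pv_equiv track=rewrite | github.com/mavrix93/home_assistant-solar_mind | custom_components/solar_mind/coordinator.py | _entity_id_strip_suffix
-- ===== SOURCE A (Python) =====
-- def _entity_id_strip_suffix(entity_id: str) -> str:
--     """Return entity_id with trailing _<digits> stripped from object_id (e.g. sensor.foo_2 -> sensor.foo)."""
--     if "." not in entity_id:
--         return entity_id
--     domain, object_id = entity_id.split(".", 1)
--     while object_id and object_id[-1].isdigit():
--         idx = object_id.rfind("_")
--         if idx < 0 or not object_id[idx + 1 :].isdigit():
--             break
--         object_id = object_id[:idx]
--     return f"{domain}.{object_id}" if object_id else entity_id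
-- ===== SOURCE B (Python) =====
-- def _entity_id_strip_suffix(entity_id: str) -> str:
--     """Return entity_id with trailing _<digits> stripped from object_id (e.g. sensor.foo_2 -> sensor.foo)."""
--     if "." not in entity_id:
--         return entity_id
--     domain, object_id = entity_id.split(".", 1)
--     parts = object_id.split("_")
--     while len(parts) > 1 and parts[-1].isdigit():
--         parts.pop()
--     object_id = "_".join(parts)
--     return f"{domain}.{object_id}" if object_id else entity_id
-- ===== Notes on version B (the rewrite author's own statement) =====
-- stated objective: simpler
-- what changed: Replaces A's character-level loop of rfind plus slicing with a token-level pass: split the object_id once on the underscore separator, pop trailing all-digit tokens while more than one token remains, and rejoin.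
import Mathlib
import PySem

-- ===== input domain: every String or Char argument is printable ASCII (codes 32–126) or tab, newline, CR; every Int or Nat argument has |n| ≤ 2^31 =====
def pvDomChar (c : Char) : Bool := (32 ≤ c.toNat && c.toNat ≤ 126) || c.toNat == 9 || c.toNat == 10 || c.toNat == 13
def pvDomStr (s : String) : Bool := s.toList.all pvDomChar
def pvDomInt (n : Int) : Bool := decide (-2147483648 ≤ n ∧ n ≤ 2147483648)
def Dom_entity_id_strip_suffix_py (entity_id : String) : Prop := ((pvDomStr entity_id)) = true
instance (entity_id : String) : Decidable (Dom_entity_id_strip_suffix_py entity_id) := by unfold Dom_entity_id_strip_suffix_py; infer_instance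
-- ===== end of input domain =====

-- B replaces A's repeated rfind('_')+slice truncation loop by one split on '_', a pop loop over
-- trailing all-digit tokens, and a rejoin (objective: simpler token-level decomposition).

-- ===== PORT A =====
-- A's while loop: while object_id ends in a digit, find the last '_'; if absent or the part
-- after it is not all digits, break; else truncate object_id at that '_'.
def pyStripLoop (oid : List Char) : List Char :=
  match PySem.List.pyGet? oid (-1) with
  | none => oid                                   -- object_id is empty: while-condition false
  | some c =>
    if PySem.Chars.isdigit c then
      let idx := PySem.Chars.rfind oid ['_']
      if h : idx < 0 ∨ PySem.Chars.strIsdigit (PySem.Chars.slice oid (some (idx + 1)) none) = false then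
        oid                                        -- break
      else
        pyStripLoop (PySem.Chars.slice oid none (some idx))
    else oid
termination_by oid.length
decreasing_by
  rw [not_or, not_lt] at h
  obtain ⟨h0, hd⟩ := h
  simp only [PySem.Chars.slice] at hd ⊢
  rw [PySem.List.slice_to oid h0]
  have hne : PySem.List.slice oid (some (PySem.Chars.rfind oid ['_'] + 1)) none ≠ [] := by
    intro hnil
    rw [hnil] at hd
    simp [PySem.Chars.strIsdigit] at hd
  rw [PySem.List.slice_from oid (by omega : (0:Int) ≤ PySem.Chars.rfind oid ['_'] + 1)] at hne
  have hlt : (PySem.Chars.rfind oid ['_'] + 1).toNat ≤ oid.length := by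
    by_contra hgt
    exact hne (List.drop_eq_nil_of_le (by omega))
  simp only [List.length_take]
  omega

def entity_id_strip_suffix_py (entity_id : String) : String :=
  if PySem.Str.isIn "." entity_id = false then entity_id
  else
    match PySem.Chars.splitOnMax entity_id.toList ['.'] 1 with
    | [domain, object_id] =>
      let oid := pyStripLoop object_id
      if oid.isEmpty = false then String.mk (domain ++ '.' :: oid) else entity_id
    | _ => entity_id  -- unreachable: split('.', 1) yields exactly two pieces when '.' is present

-- ===== PORT B =====
-- B's while loop: while len(parts) > 1 and parts[-1].isdigit(): parts.pop()
def popLoop (parts : List (List Char)) : List (List Char) :=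
  if h : 1 < parts.length ∧ PySem.Chars.strIsdigit (parts.getLastD []) = true then
    popLoop parts.dropLast
  else parts
termination_by parts.length
decreasing_by
  rw [List.length_dropLast]
  omega

def entity_id_strip_suffix_py_alt (entity_id : String) : String :=
  if PySem.Str.isIn "." entity_id = false then entity_id
  else
    match PySem.Chars.splitOnMax entity_id.toList ['.'] 1 with
    | [] => entity_id  -- unreachable: split('.', 1) yields exactly two pieces when '.' is present
    | domain :: rest =>
      match rest with
      | [] => entity_id  -- unreachable likewise
      | object_id :: rest2 =>
        match rest2 with
        | _ :: _ => entity_id  -- unreachable likewise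
        | [] =>
          let oid := PySem.Chars.join ['_'] (popLoop (PySem.Chars.splitOn object_id ['_']))
          if oid.isEmpty = false then String.mk (domain ++ '.' :: oid) else entity_id

-- ===== PRECONDITION & SPEC =====
def Spec_entity_id_strip_suffix_py (entity_id : String) (out : String) : Prop := out = entity_id_strip_suffix_py_alt entity_id
instance (entity_id : String) (out : String) : Decidable (Spec_entity_id_strip_suffix_py entity_id out) := by unfold Spec_entity_id_strip_suffix_py; infer_instance

-- ===== CLAIM (what is proved, stated in full; the proofs are below) =====
def Claim_equal_entity_id_strip_suffix_py : Prop := ∀ (entity_id : String), Dom_entity_id_strip_suffix_py entity_id → Spec_entity_id_strip_suffix_py entity_id (entity_id_strip_suffix_py entity_id)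

-- ===== LEMMAS AND PROOFS =====

-- Reference splitter: split1 cs = cs.split('_') (structural recursion, proofs only).
def split1 : List Char → List (List Char)
  | [] => [[]]
  | c :: r =>
    if c = '_' then [] :: split1 r
    else
      match split1 r with
      | p :: ps => (c :: p) :: ps
      | [] => [[c]]

theorem split1_ne_nil (cs : List Char) : split1 cs ≠ [] := by
  induction cs with
  | nil => simp [split1]
  | cons c r ih =>
    simp only [split1]
    split
    · simp
    · cases h : split1 r with
      | nil => exact absurd h ih
      | cons p ps => simp

theorem join1_split1 (cs : List Char) : PySem.Chars.join ['_'] (split1 cs) = cs := by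
  induction cs with
  | nil => decide
  | cons c r ih =>
    simp only [split1]
    split
    · rename_i hc
      subst hc
      cases h : split1 r with
      | nil => exact absurd h (split1_ne_nil r)
      | cons p ps =>
        rw [h] at ih
        rw [PySem.Chars.join_cons_cons]
        simp [ih]
    · cases h : split1 r with
      | nil => exact absurd h (split1_ne_nil r)
      | cons p ps =>
        rw [h] at ih
        cases ps with
        | nil =>
          rw [PySem.Chars.join_singleton] at ih ⊢
          simp [ih]
        | cons q qs =>
          rw [PySem.Chars.join_cons_cons] at ih ⊢
          simp [← ih]

theorem mem_split1_no_us (cs : List Char) (p : List Char) (hp : p ∈ split1 cs) : '_' ∉ p := by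
  induction cs generalizing p with
  | nil => simp [split1] at hp; simp [hp]
  | cons c r ih =>
    simp only [split1] at hp
    split at hp
    · rcases List.mem_cons.mp hp with h | h
      · simp [h]
      · exact ih p h
    · rename_i hc
      cases h : split1 r with
      | nil => exact absurd h (split1_ne_nil r)
      | cons q qs =>
        rw [h] at hp
        rcases List.mem_cons.mp hp with h' | h'
        · subst h'
          intro hmem
          rcases List.mem_cons.mp hmem with h'' | h''
          · exact hc h''.symm
          · exact ih q (h ▸ List.mem_cons_self) h''
        · exact ih p (h ▸ List.mem_cons_of_mem q h')

-- splitOn.go on separator ['_'] computes split1.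
theorem splitOn_go_eq (l : List Char) : ∀ (fuel : Nat) (cur : List Char) (acc : List (List Char)),
    l.length ≤ fuel →
    PySem.Chars.splitOn.go ['_'] fuel l cur acc =
      acc.reverse ++ (match split1 l with
        | p :: ps => (cur.reverse ++ p) :: ps
        | [] => [cur.reverse]) := by
  induction l with
  | nil =>
    intro fuel cur acc _
    cases fuel <;> simp [PySem.Chars.splitOn.go, split1]
  | cons c r ih =>
    intro fuel cur acc hfuel
    cases fuel with
    | zero => simp at hfuel
    | succ f =>
      simp only [PySem.Chars.splitOn.go]
      by_cases hc : c = '_'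
      · subst hc
        rw [if_pos (by simp [List.isPrefixOf])]
        rw [show List.drop ['_'].length ('_' :: r) = r by simp]
        rw [ih f [] ((cur.reverse) :: acc) (by simpa using hfuel)]
        simp only [split1]
        cases h : split1 r with
        | nil => exact absurd h (split1_ne_nil r)
        | cons p ps => simp
      · rw [if_neg (by simp only [List.isPrefixOf, Bool.and_eq_true, beq_iff_eq]; exact fun h => hc h.1.symm)]
        rw [ih f (c :: cur) acc (by simpa using hfuel)]
        simp only [split1, if_neg hc]
        cases h : split1 r with
        | nil => exact absurd h (split1_ne_nil r)
        | cons p ps => simp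

theorem splitOn_eq_split1 (cs : List Char) : PySem.Chars.splitOn cs ['_'] = split1 cs := by
  unfold PySem.Chars.splitOn
  rw [splitOn_go_eq cs (cs.length + 1) [] [] (by omega)]
  cases h : split1 cs with
  | nil => exact absurd h (split1_ne_nil cs)
  | cons p ps => simp

-- rfind.go characterisations for a single-character needle.
theorem rfind_go_neg (s : List Char) (c : Char) (hc : c ∉ s) :
    ∀ j : Nat, PySem.Chars.rfind.go s [c] j = -1 := by
  intro j
  induction j with
  | zero =>
    simp only [PySem.Chars.rfind.go]
    cases s with
    | nil => simp [List.isPrefixOf]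
    | cons a t =>
      have : ¬ (c = a) := fun h => hc (h ▸ List.mem_cons_self)
      simp [List.isPrefixOf, this]
  | succ j ihj =>
    simp only [PySem.Chars.rfind.go]
    have : ¬ ([c].isPrefixOf (s.drop (j + 1)) = true) := by
      cases hdrop : s.drop (j + 1) with
      | nil => simp [List.isPrefixOf]
      | cons a t =>
        have ha : a ∈ s := by
          have : a ∈ s.drop (j + 1) := by rw [hdrop]; exact List.mem_cons_self
          exact List.mem_of_mem_drop this
        have : ¬ (c = a) := fun h => hc (h ▸ ha)
        simp [List.isPrefixOf, this]
    rw [if_neg this]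
    exact ihj

theorem rfind_neg (s : List Char) (c : Char) (hc : c ∉ s) : PySem.Chars.rfind s [c] = -1 := by
  unfold PySem.Chars.rfind
  exact rfind_go_neg s c hc _

theorem rfind_go_last (xs ys : List Char) (c : Char) (hy : c ∉ ys) :
    ∀ j : Nat, xs.length ≤ j → PySem.Chars.rfind.go (xs ++ c :: ys) [c] j = xs.length := by
  intro j
  induction j with
  | zero =>
    intro hj
    have hxs : xs = [] := List.eq_nil_of_length_eq_zero (by omega)
    subst hxs
    simp [PySem.Chars.rfind.go, List.isPrefixOf]
  | succ j ihj =>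
    intro hj
    simp only [PySem.Chars.rfind.go]
    by_cases heq : xs.length = j + 1
    · have : (xs ++ c :: ys).drop (j + 1) = c :: ys := by
        rw [← heq, List.drop_append_of_le_length (le_refl _)]
        simp
      rw [this]
      simp [List.isPrefixOf, heq]
    · have hle : xs.length ≤ j := by omega
      have : ¬ ([c].isPrefixOf ((xs ++ c :: ys).drop (j + 1)) = true) := by
        have hdrop : (xs ++ c :: ys).drop (j + 1) = ys.drop (j + 1 - (xs.length + 1)) := by
          rw [show j + 1 = xs.length + (j + 1 - xs.length) by omega, List.drop_length_add_append]
          rw [show j + 1 - xs.length = (j + 1 - (xs.length + 1)) + 1 by omega]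
          simp [List.drop_succ_cons]
          omega
        rw [hdrop]
        cases hd : ys.drop (j + 1 - (xs.length + 1)) with
        | nil => simp [List.isPrefixOf]
        | cons a t =>
          have ha : a ∈ ys := List.mem_of_mem_drop (by rw [hd]; exact List.mem_cons_self)
          have : ¬ (c = a) := fun h => hy (h ▸ ha)
          simp [List.isPrefixOf, this]
      rw [if_neg this]
      exact ihj hle

theorem rfind_last (xs ys : List Char) (hy : '_' ∉ ys) :
    PySem.Chars.rfind (xs ++ '_' :: ys) ['_'] = xs.length := by
  unfold PySem.Chars.rfind
  exact rfind_go_last xs ys '_' hy _ (by simp)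

-- join on a snoc list, nonempty prefix.
theorem join1_snoc (init : List (List Char)) (lst : List Char) (h : init ≠ []) :
    PySem.Chars.join ['_'] (init ++ [lst]) =
      PySem.Chars.join ['_'] init ++ '_' :: lst := by
  induction init with
  | nil => exact absurd rfl h
  | cons p ps ih =>
    cases ps with
    | nil =>
      show PySem.Chars.join ['_'] [p, lst] = PySem.Chars.join ['_'] [p] ++ '_' :: lst
      rw [PySem.Chars.join_cons_cons, PySem.Chars.join_singleton, PySem.Chars.join_singleton]
      simp
    | cons q qs =>
      show PySem.Chars.join ['_'] (p :: ((q :: qs) ++ [lst])) = _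
      have h2 : (q :: qs) ++ [lst] = q :: (qs ++ [lst]) := by simp
      rw [h2, PySem.Chars.join_cons_cons, PySem.Chars.join_cons_cons, ← h2, ih (by simp)]
      simp

-- Main lemma: A's string loop equals B's token-pop loop on the join of underscore-free parts.
theorem stripLoop_eq_popLoop (n : Nat) : ∀ (parts : List (List Char)), parts.length ≤ n →
    parts ≠ [] → (∀ p ∈ parts, '_' ∉ p) →
    pyStripLoop (PySem.Chars.join ['_'] parts) = PySem.Chars.join ['_'] (popLoop parts) := by
  induction n with
  | zero => intro parts hlen hne _; exact absurd (List.eq_nil_of_length_eq_zero (by omega)) hne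
  | succ n ihn =>
    intro parts hlen hne hus
    obtain ⟨init, lst, rfl⟩ : ∃ init lst, parts = init ++ [lst] := by
      rcases List.eq_nil_or_concat parts with rfl | ⟨i, l, h⟩
      · exact absurd rfl hne
      · exact ⟨i, l, by simp [h]⟩
    rcases List.eq_nil_or_concat init with rfl | hinit_ne
    · -- single part: both loops stop immediately
      have hone : ¬ (1 < (([] : List (List Char)) ++ [lst]).length ∧
          PySem.Chars.strIsdigit ((([] : List (List Char)) ++ [lst]).getLastD []) = true) := by
        simp
      rw [popLoop, dif_neg hone]
      simp only [List.nil_append, PySem.Chars.join_singleton]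
      have hno : '_' ∉ lst := hus lst (by simp)
      rw [pyStripLoop]
      cases hget : PySem.List.pyGet? lst (-1) with
      | none => rfl
      | some c =>
        simp only
        split
        · rw [dif_pos (Or.inl (by rw [rfind_neg lst '_' hno]; omega))]
        · rfl
    · obtain ⟨pre, a, hpa⟩ := hinit_ne
      have hinit : init ≠ [] := by simp [hpa]
      have hjoin : PySem.Chars.join ['_'] (init ++ [lst]) =
          PySem.Chars.join ['_'] init ++ '_' :: lst := join1_snoc init lst hinit
      have hlst_no : '_' ∉ lst := hus lst (by simp)
      have hlen1 : 1 < (init ++ [lst]).length := by simp [hpa]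
      have hlast : (init ++ [lst]).getLastD [] = lst := by simp
      have hrfind : PySem.Chars.rfind (PySem.Chars.join ['_'] init ++ '_' :: lst) ['_'] =
          (PySem.Chars.join ['_'] init).length := rfind_last _ lst hlst_no
      by_cases hdig : PySem.Chars.strIsdigit lst = true
      · -- pop lst on the B side; strip '_' :: lst on the A side
        rw [popLoop, dif_pos ⟨hlen1, by rw [hlast]; exact hdig⟩]
        have hdrop : (init ++ [lst]).dropLast = init := by simp
        rw [hdrop]
        have hlst_ne : lst ≠ [] := by
          intro h; rw [h] at hdig; simp [PySem.Chars.strIsdigit] at hdig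
      -- the head of A's loop body
        have hget : PySem.List.pyGet? (PySem.Chars.join ['_'] init ++ '_' :: lst) (-1) =
            some (lst.getLast hlst_ne) := by
          rw [PySem.List.pyGet?_neg_one, List.getLast?_append_of_ne_nil _ (by simp : ('_' :: lst) ≠ []),
              List.getLast?_cons]
          rw [List.getLast?_eq_some_getLast hlst_ne]
          rfl
        have hdigc : PySem.Chars.isdigit (lst.getLast hlst_ne) = true := by
          have hall := (Bool.and_eq_true .. ▸ hdig).2
          exact List.all_eq_true.mp hall _ (List.getLast_mem hlst_ne)
        have hslice_suffix : PySem.Chars.slice (PySem.Chars.join ['_'] init ++ '_' :: lst)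
            (some ((PySem.Chars.join ['_'] init).length + 1)) none = lst := by
          simp only [PySem.Chars.slice]
          rw [show ((PySem.Chars.join ['_'] init).length : Int) + 1 =
              (((PySem.Chars.join ['_'] init).length + 1 : Nat) : Int) by push_cast; ring]
          rw [PySem.List.slice_from _ (by exact Int.natCast_nonneg _)]
          simp only [Int.toNat_natCast]
          rw [List.drop_length_add_append 1]
          simp
        have hslice_prefix : PySem.Chars.slice (PySem.Chars.join ['_'] init ++ '_' :: lst)
            none (some ((PySem.Chars.join ['_'] init).length)) = PySem.Chars.join ['_'] init := by
          simp only [PySem.Chars.slice]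
          rw [PySem.List.slice_to _ (by exact Int.natCast_nonneg _)]
          simp
        rw [hjoin, pyStripLoop]
        simp only [hget, hdigc, if_true, hrfind]
        rw [dif_neg (by
          rw [not_or, not_lt]
          constructor
          · exact Int.natCast_nonneg _
          · rw [hslice_suffix]; simp [hdig])]
        rw [hslice_prefix]
        exact ihn init (by simp at hlen ⊢; omega) hinit
          (fun p hp => hus p (List.mem_append_left _ hp))
      · -- both loops stop
        rw [popLoop, dif_neg (by rw [hlast]; exact fun h => hdig h.2)]
        rw [hjoin, pyStripLoop]
        cases hget : PySem.List.pyGet? (PySem.Chars.join ['_'] init ++ '_' :: lst) (-1) with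
        | none => rfl
        | some c =>
          simp only
          split
          · rename_i hcd
            rw [dif_pos (Or.inr (by
                rw [hrfind]
                simp only [PySem.Chars.slice]
                rw [show ((PySem.Chars.join ['_'] init).length : Int) + 1 =
                    (((PySem.Chars.join ['_'] init).length + 1 : Nat) : Int) by push_cast; ring,
                  PySem.List.slice_from _ (by exact Int.natCast_nonneg _)]
                simp only [Int.toNat_natCast]
                rw [List.drop_length_add_append 1]
                simp only [List.drop_succ_cons, List.drop_zero]
                exact Bool.eq_false_iff.mpr hdig))]
          · rfl

-- A's loop equals B's split-pop-join pipeline on any object_id.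
theorem key_loop (o : List Char) :
    pyStripLoop o = PySem.Chars.join ['_'] (popLoop (PySem.Chars.splitOn o ['_'])) := by
  rw [splitOn_eq_split1]
  have h := stripLoop_eq_popLoop (split1 o).length (split1 o) le_rfl (split1_ne_nil o)
    (mem_split1_no_us o)
  rw [join1_split1] at h
  exact h

-- ===== VERDICT (by name: the statement is the Claim_ definition above) =====
theorem entity_id_strip_suffix_py_spec : Claim_equal_entity_id_strip_suffix_py := by
  intro s _
  unfold Spec_entity_id_strip_suffix_py entity_id_strip_suffix_py entity_id_strip_suffix_py_alt
  by_cases hin : PySem.Str.isIn "." s = false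
  · rw [if_pos hin, if_pos hin]
  · rw [if_neg hin, if_neg hin]
    cases h : PySem.Chars.splitOnMax s.toList ['.'] 1 with
    | nil => rfl
    | cons d rest =>
      cases rest with
      | nil => rfl
      | cons o rest2 =>
        cases rest2 with
        | nil => simp only [key_loop o]
        | cons _ _ => rfl
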